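-- pv_equiv track=rewrite | github.com/atomadictech/atomadic-lang | src/atomadic_lang/a1_at_functions/corpus_analysis.py | count_trigrams
-- ===== SOURCE A (Python) =====
-- from collections import Counter
-- from collections.abc import Iterable
--
-- def char_trigrams(line: str, *, skip_whitespace_boundaries: bool = True) -> Iterable[str]:
--     """Yield every character trigram inside ``line`` that doesn't span whitespace."""
--     for i in range(len(line) - 2):
--         a, b, c = line[i], line[i + 1], line[i + 2]
--         if skip_whitespace_boundaries and any(ch.isspace() for ch in (a, b, c)):
--             continue
--         yield a + b + c
--
-- def count_trigrams(corpus: str | Iterable[str]) -> Counter[str]: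
--     """Count every cross-line character trigram in the corpus."""
--     counter: Counter[str] = Counter()
--     if isinstance(corpus, str):
--         lines = corpus.splitlines()
--     else:
--         lines = list(corpus)
--     for line in lines:
--         counter.update(char_trigrams(line))
--     return counter
-- ===== SOURCE B (Python) =====
-- from collections import Counter
-- from collections.abc import Iterable
--
--
-- def count_trigrams(corpus: "str | Iterable[str]") -> "Counter[str]":
--     """Count every cross-line character trigram in the corpus."""
--     counter: Counter[str] = Counter()
--     lines = corpus.splitlines() if isinstance(corpus, str) else list(corpus)
--     for line in lines:
--         for token in line.split():
--             for i in range(len(token) - 2):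
--                 counter[token[i:i + 3]] += 1
--     return counter
-- ===== Notes on version B (the rewrite author's own statement) =====
-- stated objective: simpler
-- what changed: B drops the char_trigrams helper and its per-position three-character whitespace filter, instead tokenizing each line with argument-less str.split() and counting every trigram slice inside each whitespace-free token.
import Mathlib
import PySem

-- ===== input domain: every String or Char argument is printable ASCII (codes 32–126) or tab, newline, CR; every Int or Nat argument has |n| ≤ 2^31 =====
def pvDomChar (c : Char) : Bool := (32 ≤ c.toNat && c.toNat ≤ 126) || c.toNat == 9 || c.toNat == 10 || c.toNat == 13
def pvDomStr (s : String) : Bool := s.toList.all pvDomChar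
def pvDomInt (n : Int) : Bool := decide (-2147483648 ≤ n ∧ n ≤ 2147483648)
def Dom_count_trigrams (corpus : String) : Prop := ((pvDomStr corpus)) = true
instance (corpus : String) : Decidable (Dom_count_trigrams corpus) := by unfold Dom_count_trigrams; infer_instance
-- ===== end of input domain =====

-- B replaces A's filter-every-position scan (helper char_trigrams) by tokenize-with-split()
-- then scan each whitespace-free token; objective: simpler (same counts, same order).

-- ===== PORT A =====
-- helper char_trigrams(line, skip_whitespace_boundaries=True): the generator is ported as the
-- list of yielded strings, in order.
def char_trigrams (line : String) (skipWs : Bool) : List String :=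
  (PySem.List.pyRange 0 ((PySem.Str.len line : Int) - 2) 1).foldl (fun acc i =>
    match PySem.Str.pyGet? line i, PySem.Str.pyGet? line (i + 1), PySem.Str.pyGet? line (i + 2) with
    | some a, some b, some c =>
        if skipWs && (PySem.Chars.isspace a || PySem.Chars.isspace b || PySem.Chars.isspace c) then
          acc
        else acc ++ [String.ofList [a, b, c]]
    | _, _, _ => acc) []

-- corpus is a String here, so the isinstance(corpus, str) branch always takes splitlines().
def count_trigrams (corpus : String) : List (String × Int) :=
  let lines := PySem.Str.splitlines corpus
  (lines.foldl (fun counter line =>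
      (char_trigrams line true).foldl (fun c t => c.modify t 0 (· + 1)) counter)
    (PySem.Dict.empty : PySem.Dict String Int)).items

-- ===== PORT B =====
def count_trigrams_alt (corpus : String) : List (String × Int) :=
  let lines := PySem.Str.splitlines corpus
  (lines.foldl (fun counter line =>
      (PySem.Str.split₀ line).foldl (fun counter tok =>
        (PySem.List.pyRange 0 ((PySem.Str.len tok : Int) - 2) 1).foldl (fun c i =>
          c.modify (PySem.Str.slice tok (some i) (some (i + 3))) 0 (· + 1)) counter)
        counter)
    (PySem.Dict.empty : PySem.Dict String Int)).items

-- ===== PRECONDITION & SPEC =====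
def Spec_count_trigrams (corpus : String) (out : List (String × Int)) : Prop := out = count_trigrams_alt corpus
instance (corpus : String) (out : List (String × Int)) : Decidable (Spec_count_trigrams corpus out) := by unfold Spec_count_trigrams; infer_instance

-- ===== CLAIM (what is proved, stated in full; the proofs are below) =====
def Claim_equal_count_trigrams : Prop := ∀ (corpus : String), Dom_count_trigrams corpus → Spec_count_trigrams corpus (count_trigrams corpus)

-- ===== LEMMAS AND PROOFS =====

-- A's filtered scan, written structurally: emit the trigram at the head unless one of its
-- three characters is whitespace, then move one character right.
def scanF : List Char → List String
  | a :: b :: c :: r =>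
      (if PySem.Chars.isspace a || PySem.Chars.isspace b || PySem.Chars.isspace c then []
       else [String.ofList [a, b, c]]) ++ scanF (b :: c :: r)
  | _ => []

-- B's unfiltered scan of a single token, written structurally.
def scanT : List Char → List String
  | a :: b :: c :: r => String.ofList [a, b, c] :: scanT (b :: c :: r)
  | _ => []

lemma scanF_short {cs : List Char} (h : cs.length ≤ 2) : scanF cs = [] := by
  match cs with
  | [] => simp [scanF]
  | [a] => simp [scanF]
  | [a, b] => simp [scanF]
  | a :: b :: c :: r => simp at h

lemma scanT_short {cs : List Char} (h : cs.length ≤ 2) : scanT cs = [] := by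
  match cs with
  | [] => simp [scanT]
  | [a] => simp [scanT]
  | [a, b] => simp [scanT]
  | a :: b :: c :: r => simp at h

lemma flat_scanF : ∀ (cs : List Char),
    (List.range (cs.length - 2)).flatMap (fun i =>
      if PySem.Chars.isspace (cs.getD i ' ') || PySem.Chars.isspace (cs.getD (i + 1) ' ')
          || PySem.Chars.isspace (cs.getD (i + 2) ' ') then []
      else [String.ofList [cs.getD i ' ', cs.getD (i + 1) ' ', cs.getD (i + 2) ' ']]) = scanF cs
  | [] => by simp [scanF]
  | [a] => by simp [scanF]
  | [a, b] => by simp [scanF]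
  | a :: b :: c :: r => by
    have hl : (a :: b :: c :: r).length - 2 = r.length + 1 := by simp
    rw [hl, List.range_succ_eq_map, List.flatMap_cons, List.flatMap_map]
    have ih := flat_scanF (b :: c :: r)
    have hl2 : (b :: c :: r).length - 2 = r.length := by simp
    rw [hl2] at ih
    rw [show scanF (a :: b :: c :: r) =
        (if PySem.Chars.isspace a || PySem.Chars.isspace b || PySem.Chars.isspace c then []
         else [String.ofList [a, b, c]]) ++ scanF (b :: c :: r) from rfl, ← ih]
    simp [Nat.succ_eq_add_one]

lemma flat_scanT : ∀ (cs : List Char),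
    (List.range (cs.length - 2)).map (fun i => String.ofList ((cs.drop i).take 3)) = scanT cs
  | [] => by simp [scanT]
  | [a] => by simp [scanT]
  | [a, b] => by simp [scanT]
  | a :: b :: c :: r => by
    have hl : (a :: b :: c :: r).length - 2 = r.length + 1 := by simp
    rw [hl, List.range_succ_eq_map, List.map_cons, List.map_map]
    have ih := flat_scanT (b :: c :: r)
    have hl2 : (b :: c :: r).length - 2 = r.length := by simp
    rw [hl2] at ih
    rw [show scanT (a :: b :: c :: r) = String.ofList [a, b, c] :: scanT (b :: c :: r) from rfl, ← ih]
    simp [Nat.succ_eq_add_one, Function.comp]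

lemma char_trigrams_eq_scanF (line : String) : char_trigrams line true = scanF line.toList := by
  unfold char_trigrams
  by_cases h : 2 ≤ line.toList.length
  · have hcast : (PySem.Str.len line : Int) - 2 = ((line.toList.length - 2 : Nat) : Int) := by
      simp only [PySem.Str.len]; omega
    rw [hcast, PySem.List.pyRange_zero_natCast, List.foldl_map]
    rw [PySem.List.foldl_congr_mem (g := fun acc (k : Nat) =>
        acc ++ (if PySem.Chars.isspace (line.toList.getD k ' ')
            || PySem.Chars.isspace (line.toList.getD (k + 1) ' ')
            || PySem.Chars.isspace (line.toList.getD (k + 2) ' ') then []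
          else [String.ofList [line.toList.getD k ' ', line.toList.getD (k + 1) ' ',
              line.toList.getD (k + 2) ' ']]))]
    · rw [PySem.List.foldl_append_eq_flatMap, List.nil_append, flat_scanF]
    · intro acc k hk
      have hk' : k + 2 < line.toList.length := by
        have := List.mem_range.mp hk; omega
      have h0 : PySem.Str.pyGet? line (↑k) = some (line.toList.getD k ' ') := by
        rw [PySem.Str.pyGet?_natCast, List.getElem?_eq_getElem (by omega),
          List.getD_eq_getElem _ _ (by omega)]
      have h1 : PySem.Str.pyGet? line (↑k + 1) = some (line.toList.getD (k + 1) ' ') := by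
        rw [show ((k : Int) + 1) = ((k + 1 : Nat) : Int) by push_cast; ring,
          PySem.Str.pyGet?_natCast, List.getElem?_eq_getElem (by omega),
          List.getD_eq_getElem _ _ (by omega)]
      have h2 : PySem.Str.pyGet? line (↑k + 2) = some (line.toList.getD (k + 2) ' ') := by
        rw [show ((k : Int) + 2) = ((k + 2 : Nat) : Int) by push_cast; ring,
          PySem.Str.pyGet?_natCast, List.getElem?_eq_getElem (by omega),
          List.getD_eq_getElem _ _ (by omega)]
      rw [h0, h1, h2]
      simp only [Bool.true_and]
      split <;> simp
  · have hnil : PySem.List.pyRange 0 ((PySem.Str.len line : Int) - 2) 1 = [] := by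
      apply PySem.List.pyRange_one_eq_nil
      simp only [PySem.Str.len]; omega
    rw [hnil, scanF_short (by omega)]
    rfl

-- split₀.go with a nonempty accumulator only prepends the reversed accumulator.
lemma split₀_go_acc : ∀ (cs cur : List Char) (acc : List (List Char)),
    PySem.Chars.split₀.go cs cur acc = acc.reverse ++ PySem.Chars.split₀.go cs cur []
  | [], cur, acc => by
    simp only [PySem.Chars.split₀.go]
    split <;> simp
  | c :: rest, cur, acc => by
    simp only [PySem.Chars.split₀.go]
    split
    · split
      · rw [split₀_go_acc rest [] acc]
      · rw [split₀_go_acc rest [] (cur.reverse :: acc), split₀_go_acc rest [] [cur.reverse]]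
        simp
    · exact split₀_go_acc rest (c :: cur) acc

lemma split₀_go_nil_nil (l : List Char) :
    PySem.Chars.split₀.go l [] [] = PySem.Chars.split₀ l := rfl

lemma split₀_cons_space {c : Char} (cs : List Char) (h : PySem.Chars.isspace c = true) :
    PySem.Chars.split₀ (c :: cs) = PySem.Chars.split₀ cs := by
  show PySem.Chars.split₀.go (c :: cs) [] [] = PySem.Chars.split₀.go cs [] []
  simp only [PySem.Chars.split₀.go]
  simp [h]

lemma split₀_go_cur : ∀ (cs : List Char) (cur : List Char), cur ≠ [] →
    PySem.Chars.split₀.go cs cur [] =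
      (cur.reverse ++ cs.takeWhile (fun c => !PySem.Chars.isspace c)) ::
        PySem.Chars.split₀ (cs.dropWhile (fun c => !PySem.Chars.isspace c))
  | [], cur, h => by
    simp only [PySem.Chars.split₀.go]
    rw [if_neg (by simpa [List.isEmpty_iff] using h)]
    simp [PySem.Chars.split₀, PySem.Chars.split₀.go]
  | c :: rest, cur, h => by
    simp only [PySem.Chars.split₀.go]
    by_cases hc : PySem.Chars.isspace c
    · rw [if_pos hc, if_neg (by simp [List.isEmpty_iff, h])]
      rw [split₀_go_acc rest [] [cur.reverse]]
      simp [hc, split₀_go_nil_nil, split₀_cons_space rest hc]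
    · rw [if_neg hc]
      rw [split₀_go_cur rest (c :: cur) (by simp)]
      simp [hc]

lemma split₀_cons_nonspace {c : Char} (cs : List Char) (h : PySem.Chars.isspace c = false) :
    PySem.Chars.split₀ (c :: cs) =
      (c :: cs.takeWhile (fun c => !PySem.Chars.isspace c)) ::
        PySem.Chars.split₀ (cs.dropWhile (fun c => !PySem.Chars.isspace c)) := by
  show PySem.Chars.split₀.go (c :: cs) [] [] = _
  simp only [PySem.Chars.split₀.go]
  rw [if_neg (by simp [h]), split₀_go_cur cs [c] (by simp)]
  simp

lemma scanF_space_head {c : Char} (cs : List Char) (h : PySem.Chars.isspace c = true) :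
    scanF (c :: cs) = scanF cs := by
  match cs with
  | [] => simp [scanF]
  | [a] => simp [scanF]
  | a :: b :: r => simp [scanF, h]

lemma scanF_space_head_mid (b d : Char) (u' : List Char) (hd : PySem.Chars.isspace d = true) :
    scanF (b :: d :: u') = scanF (d :: u') := by
  match u' with
  | [] => simp [scanF]
  | e :: u'' => simp [scanF, hd, scanF_space_head (e :: u'') hd]

-- a space-free block followed by nothing or by a whitespace character scans to its own trigrams
lemma scanF_block : ∀ (t : List Char) (u : List Char),
    (∀ x ∈ t, PySem.Chars.isspace x = false) →
    (u = [] ∨ ∃ d u', u = d :: u' ∧ PySem.Chars.isspace d = true) →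
    scanF (t ++ u) = scanT t ++ scanF u
  | [], u, _, _ => by simp [scanT]
  | [a], u, ht, hu => by
    rcases hu with rfl | ⟨d, u', rfl, hd⟩
    · simp [scanF, scanT]
    · match u' with
      | [] => simp [scanF, scanT]
      | e :: u'' => simp [scanF, scanT, hd]
  | [a, b], u, ht, hu => by
    rcases hu with rfl | ⟨d, u', rfl, hd⟩
    · simp [scanF, scanT]
    · have hA : scanF ([a, b] ++ (d :: u')) =
          (if PySem.Chars.isspace a || PySem.Chars.isspace b || PySem.Chars.isspace d then []
           else [String.ofList [a, b, d]]) ++ scanF (b :: d :: u') := rfl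
      rw [hA, scanF_space_head_mid b d u' hd]
      simp [scanT, hd]
  | a :: b :: c :: t', u, ht, hu => by
    have ih := scanF_block (b :: c :: t') u (fun x hx => ht x (by simp at hx ⊢; tauto)) hu
    have ha := ht a (by simp)
    have hb := ht b (by simp)
    have hc := ht c (by simp)
    have hA : scanF ((a :: b :: c :: t') ++ u) =
        (if PySem.Chars.isspace a || PySem.Chars.isspace b || PySem.Chars.isspace c then []
         else [String.ofList [a, b, c]]) ++ scanF ((b :: c :: t') ++ u) := rfl
    have hT : scanT (a :: b :: c :: t') = String.ofList [a, b, c] :: scanT (b :: c :: t') := rfl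
    rw [hA, ih, hT]
    simp [ha, hb, hc]

theorem scanF_flatMap_split₀ : ∀ (cs : List Char),
    scanF cs = (PySem.Chars.split₀ cs).flatMap scanT
  | [] => rfl
  | c :: rest => by
    by_cases hc : PySem.Chars.isspace c
    · rw [scanF_space_head rest hc, split₀_cons_space rest hc]
      exact scanF_flatMap_split₀ rest
    · have hsplit : c :: rest =
          (c :: rest.takeWhile (fun x => !PySem.Chars.isspace x)) ++
            rest.dropWhile (fun x => !PySem.Chars.isspace x) := by
        simp [List.takeWhile_append_dropWhile]
      have ht : ∀ x ∈ c :: rest.takeWhile (fun x => !PySem.Chars.isspace x),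
          PySem.Chars.isspace x = false := by
        intro x hx
        rcases List.mem_cons.mp hx with rfl | hx
        · exact Bool.eq_false_iff.mpr hc
        · have := List.mem_takeWhile_imp hx
          simpa using this
      have hu : rest.dropWhile (fun x => !PySem.Chars.isspace x) = [] ∨
          ∃ d u', rest.dropWhile (fun x => !PySem.Chars.isspace x) = d :: u' ∧
            PySem.Chars.isspace d = true := by
        cases hdw : rest.dropWhile (fun x => !PySem.Chars.isspace x) with
        | nil => exact Or.inl rfl
        | cons d u' =>
          refine Or.inr ⟨d, u', rfl, ?_⟩
          have := List.head_dropWhile_not (fun x => !PySem.Chars.isspace x) (l := rest)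
            (by simp [hdw])
          simp [hdw] at this
          simpa using this
      conv_lhs => rw [hsplit]
      rw [scanF_block _ _ ht hu, split₀_cons_nonspace rest (Bool.eq_false_iff.mpr hc),
        List.flatMap_cons]
      congr 1
      exact scanF_flatMap_split₀ (rest.dropWhile (fun x => !PySem.Chars.isspace x))
  termination_by cs => cs.length
  decreasing_by
  · simp
  · simp
    have := List.length_dropWhile_le (fun x => !PySem.Chars.isspace x) rest
    omega

lemma foldl_foldl_flatMap {α β γ : Type} (l : List α) (g : α → List β) (f : γ → β → γ) (d : γ) :
    l.foldl (fun d x => (g x).foldl f d) d = (l.flatMap g).foldl f d := by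
  induction l generalizing d with
  | nil => rfl
  | cons x xs ih => simp [List.flatMap_cons, List.foldl_append, ih]

lemma slice_map_eq_scanT (tok : String) :
    (PySem.List.pyRange 0 ((PySem.Str.len tok : Int) - 2) 1).map
      (fun i => PySem.Str.slice tok (some i) (some (i + 3))) = scanT tok.toList := by
  by_cases h : 2 ≤ tok.toList.length
  · have hcast : (PySem.Str.len tok : Int) - 2 = ((tok.toList.length - 2 : Nat) : Int) := by
      simp only [PySem.Str.len]; omega
    rw [hcast, PySem.List.pyRange_zero_natCast, List.map_map, ← flat_scanT tok.toList]
    apply List.map_congr_left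
    intro k hk
    simp only [Function.comp]
    rw [show ((k : Int) + 3) = ((k + 3 : Nat) : Int) by push_cast; ring]
    unfold PySem.Str.slice
    rw [PySem.Chars.slice_eq_listSlice, PySem.List.slice_natCast]
    congr 2
    omega
  · have hnil : PySem.List.pyRange 0 ((PySem.Str.len tok : Int) - 2) 1 = [] := by
      apply PySem.List.pyRange_one_eq_nil
      simp only [PySem.Str.len]; omega
    rw [hnil, scanT_short (by omega)]
    rfl

-- ===== VERDICT (by name: the statement is the Claim_ definition above) =====
theorem count_trigrams_spec : Claim_equal_count_trigrams := by
  intro corpus _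
  unfold Spec_count_trigrams count_trigrams count_trigrams_alt
  simp only []
  congr 1
  apply PySem.List.foldl_congr_mem
  intro counter line _
  have hB : (PySem.Str.split₀ line).foldl (fun counter tok =>
        (PySem.List.pyRange 0 ((PySem.Str.len tok : Int) - 2) 1).foldl (fun c i =>
          c.modify (PySem.Str.slice tok (some i) (some (i + 3))) 0 (· + 1)) counter) counter
      = ((PySem.Chars.split₀ line.toList).flatMap scanT).foldl
          (fun c t => c.modify t 0 (· + 1)) counter := by
    rw [PySem.List.foldl_congr_mem (g := fun (d : PySem.Dict String Int) tok =>
        (scanT tok.toList).foldl (fun c t => c.modify t 0 (· + 1)) d)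
      (h := by
        intro d tok _
        simp only []
        rw [← slice_map_eq_scanT tok, List.foldl_map])]
    rw [foldl_foldl_flatMap]
    rw [show PySem.Str.split₀ line =
        (PySem.Chars.split₀ line.toList).map String.ofList from rfl]
    rw [List.flatMap_map]
    simp [String.toList_ofList]
  rw [char_trigrams_eq_scanF, scanF_flatMap_split₀, hB]
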